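-- pv_equiv track=rewrite | github.com/iphswift/rehearser | backend/region_extraction.py | word_based_lcs_alignment_with_pairs
-- ===== SOURCE A (Python) =====
-- def word_based_lcs_alignment_with_pairs(text1: str, text2: str):
--     """
--     Performs a word-based LCS. Returns a list of (i, j) pairs where:
--       - i is the index of the matched word in text1
--       - j is the index of the matched word in text2
--     """
--     words1 = text1.split()
--     words2 = text2.split()
--     m, n = len(words1), len(words2)
--
--     dp = [[0]*(n+1) for _ in range(m+1)]
--     # Fill dp matrix
--     for i in range(m):
--         for j in range(n):
--             if words1[i].lower() == words2[j].lower():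
--                 dp[i+1][j+1] = dp[i][j] + 1
--             else:
--                 dp[i+1][j+1] = max(dp[i][j+1], dp[i+1][j])
--
--     # Backtrack to find the actual matched pairs
--     pairs = []
--     i, j = m, n
--     while i > 0 and j > 0:
--         if words1[i-1].lower() == words2[j-1].lower():
--             pairs.append((i-1, j-1))
--             i -= 1
--             j -= 1
--         else:
--             if dp[i-1][j] > dp[i][j-1]:
--                 i -= 1
--             else:
--                 j -= 1
--
--     return list(reversed(pairs))
-- ===== SOURCE B (Python) =====
-- def word_based_lcs_alignment_with_pairs(text1: str, text2: str):
--     """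
--     Word-based LCS returning matched (i, j) index pairs.
--     Forward row-by-row DP whose cells store the matched pair-list itself
--     (no integer length matrix, no backtracking pass); pairs come out in
--     forward order directly.
--     """
--     words1 = [w.lower() for w in text1.split()]
--     words2 = [w.lower() for w in text2.split()]
--     prev = [[] for _ in range(len(words2) + 1)]
--     for i in range(len(words1)):
--         w = words1[i]
--         cur = [[]]
--         for j in range(len(words2)):
--             v = words2[j]
--             if w == v:
--                 cur.append(prev[j] + [(i, j)])
--             else:
--                 cur.append(prev[j + 1] if len(prev[j + 1]) > len(cur[j]) else cur[j])
--         prev = cur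
--     return prev[-1]
-- ===== Notes on version B (the rewrite author's own statement) =====
-- stated objective: alternative
-- what changed: Replaced the integer length matrix plus backward backtracking pass with a forward row-by-row DP whose cells store the matched pair-list itself, returning the final cell directly in forward order.
import Mathlib
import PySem

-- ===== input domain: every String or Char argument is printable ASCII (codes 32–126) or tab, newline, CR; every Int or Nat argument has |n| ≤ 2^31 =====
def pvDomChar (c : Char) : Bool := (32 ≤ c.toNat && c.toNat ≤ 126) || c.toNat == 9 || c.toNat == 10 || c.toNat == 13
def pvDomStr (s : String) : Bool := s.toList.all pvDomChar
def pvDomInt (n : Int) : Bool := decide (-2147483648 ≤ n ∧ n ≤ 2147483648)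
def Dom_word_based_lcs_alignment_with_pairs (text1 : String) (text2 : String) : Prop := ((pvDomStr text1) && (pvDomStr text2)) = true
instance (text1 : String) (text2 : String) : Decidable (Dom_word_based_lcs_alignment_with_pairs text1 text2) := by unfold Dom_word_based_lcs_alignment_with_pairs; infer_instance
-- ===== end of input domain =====

-- B replaces A's integer dp matrix + backward backtracking pass by a forward row
-- DP whose cells store the matched pair-list itself (objective: alternative).

-- ===== PORT A =====
-- the body of A's inner dp-fill loop (one assignment dp[i+1][j+1] = …);
-- all dp reads/writes are in range in A, so getD/set are exact for them
def pvFillEntry (w1 w2 : List String) (dp : List (List Int)) (i j : Nat) : List (List Int) :=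
  dp.set (i+1) ((dp.getD (i+1) []).set (j+1)
    (if PySem.Str.lower (w1.getD i "") == PySem.Str.lower (w2.getD j "") then
      (dp.getD i []).getD j 0 + 1
    else
      max ((dp.getD i []).getD (j+1) 0) ((dp.getD (i+1) []).getD j 0)))

-- A's backtracking while-loop; i, j are the Python ints (always ≥ 0 here, so Nat)
def btA (w1 w2 : List String) (dp : List (List Int)) : Nat → Nat → List (Int × Int) → List (Int × Int)
  | i+1, j+1, pairs =>
    if PySem.Str.lower (w1.getD i "") == PySem.Str.lower (w2.getD j "") then
      btA w1 w2 dp i j (pairs ++ [((i : Int), (j : Int))])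
    else if (dp.getD i []).getD (j+1) 0 > (dp.getD (i+1) []).getD j 0 then
      btA w1 w2 dp i (j+1) pairs
    else
      btA w1 w2 dp (i+1) j pairs
  | _, _, pairs => pairs
  termination_by i j _ => i + j

def word_based_lcs_alignment_with_pairs (text1 : String) (text2 : String) : List (Int × Int) :=
  let words1 := PySem.Str.split₀ text1
  let words2 := PySem.Str.split₀ text2
  let m := words1.length
  let n := words2.length
  let dp0 : List (List Int) := List.replicate (m+1) (List.replicate (n+1) (0:Int))
  let dp := (List.range m).foldl (fun dp i =>
    (List.range n).foldl (fun dp j => pvFillEntry words1 words2 dp i j) dp) dp0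
  (btA words1 words2 dp m n []).reverse

-- ===== PORT B =====
def word_based_lcs_alignment_with_pairs_alt (text1 : String) (text2 : String) : List (Int × Int) :=
  let words1 := (PySem.Str.split₀ text1).map PySem.Str.lower
  let words2 := (PySem.Str.split₀ text2).map PySem.Str.lower
  let prev0 : List (List (Int × Int)) := List.replicate (words2.length + 1) []
  let prev := (List.range words1.length).foldl (fun prev i =>
    let w := words1.getD i ""
    (List.range words2.length).foldl (fun cur j =>
      let v := words2.getD j ""
      if w == v then cur ++ [prev.getD j [] ++ [((i : Int), (j : Int))]]
      else cur ++ [if (prev.getD (j+1) []).length > (cur.getD j []).length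
                   then prev.getD (j+1) [] else cur.getD j []]) [[]]) prev0
  prev.getD (prev.length - 1) []   -- prev[-1]; prev is never empty

-- ===== PRECONDITION & SPEC =====
def Spec_word_based_lcs_alignment_with_pairs (text1 : String) (text2 : String) (out : List (Int × Int)) : Prop := out = word_based_lcs_alignment_with_pairs_alt text1 text2
instance (text1 : String) (text2 : String) (out : List (Int × Int)) : Decidable (Spec_word_based_lcs_alignment_with_pairs text1 text2 out) := by unfold Spec_word_based_lcs_alignment_with_pairs; infer_instance

-- ===== CLAIM (what is proved, stated in full; the proofs are below) =====
def Claim_equal_word_based_lcs_alignment_with_pairs : Prop := ∀ (text1 : String) (text2 : String), Dom_word_based_lcs_alignment_with_pairs text1 text2 → Spec_word_based_lcs_alignment_with_pairs text1 text2 (word_based_lcs_alignment_with_pairs text1 text2)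

-- ===== LEMMAS AND PROOFS =====

-- Reference recurrence: the pair-list LCS on two (already lowered) word lists.
def pvS (la lb : List String) : Nat → Nat → List (Int × Int)
  | 0, _ => []
  | _+1, 0 => []
  | i+1, j+1 =>
    if la.getD i "" == lb.getD j "" then pvS la lb i j ++ [((i : Int), (j : Int))]
    else if (pvS la lb i (j+1)).length > (pvS la lb (i+1) j).length
         then pvS la lb i (j+1) else pvS la lb (i+1) j
  termination_by i j => i + j

theorem pvS_zero_l (la lb : List String) (j : Nat) : pvS la lb 0 j = [] := by
  cases j <;> simp [pvS]

theorem pvS_zero_r (la lb : List String) (i : Nat) : pvS la lb i 0 = [] := by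
  cases i <;> simp [pvS]

theorem pvS_succ (la lb : List String) (i j : Nat) :
    pvS la lb (i+1) (j+1) =
      if la.getD i "" == lb.getD j "" then pvS la lb i j ++ [((i : Int), (j : Int))]
      else if (pvS la lb i (j+1)).length > (pvS la lb (i+1) j).length
           then pvS la lb i (j+1) else pvS la lb (i+1) j := by
  rw [pvS]

theorem getD_lower (l : List String) (i : Nat) :
    (l.map PySem.Str.lower).getD i "" = PySem.Str.lower (l.getD i "") := by
  simp only [List.getD_eq_getElem?_getD, List.getElem?_map]
  cases h : l[i]? with
  | none => simp; decide
  | some s => simp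

-- LCS lengths (as Int, the type stored in A's dp)
def pvF (la lb : List String) (i j : Nat) : Int := ((pvS la lb i j).length : Int)

theorem pvF_succ (la lb : List String) (i j : Nat) :
    pvF la lb (i+1) (j+1) =
      if la.getD i "" == lb.getD j "" then pvF la lb i j + 1
      else max (pvF la lb i (j+1)) (pvF la lb (i+1) j) := by
  unfold pvF
  rw [pvS_succ]
  split_ifs with h1 h2
  · simp
  · rw [← Nat.cast_max]; congr 1; omega
  · rw [← Nat.cast_max]; congr 1; omega

-- closed forms for A's dp table
def pvGOut (la lb : List String) (i r c : Nat) : Int :=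
  if r ≤ i then pvF la lb r c else 0

def pvGIn (la lb : List String) (i j r c : Nat) : Int :=
  if r ≤ i then pvF la lb r c else if r = i+1 ∧ c ≤ j then pvF la lb r c else 0

def pvTbl (g : Nat → Nat → Int) (m n : Nat) : List (List Int) :=
  (List.range (m+1)).map (fun r => (List.range (n+1)).map (g r))

theorem pvTbl_get (g : Nat → Nat → Int) (m n r c : Nat) (hr : r ≤ m) (hc : c ≤ n) :
    ((pvTbl g m n).getD r []).getD c 0 = g r c := by
  unfold pvTbl
  rw [PySem.List.getD_map_range _ _ _ _ (by omega)]
  exact PySem.List.getD_map_range _ _ _ _ (by omega)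

theorem pvTbl_set (g : Nat → Nat → Int) (m n r c : Nat) (v : Int) (hr : r ≤ m) (_hc : c ≤ n) :
    (pvTbl g m n).set r (((pvTbl g m n).getD r []).set c v)
      = pvTbl (fun r' c' => if r' = r ∧ c' = c then v else g r' c') m n := by
  unfold pvTbl
  rw [PySem.List.getD_map_range _ _ _ _ (by omega)]
  apply List.ext_getElem (by simp)
  intro p hp hp'
  simp only [List.getElem_set, List.getElem_map, List.getElem_range]
  by_cases hpr : r = p
  · subst hpr
    rw [if_pos rfl]
    apply List.ext_getElem (by simp)
    intro q hq hq'
    simp only [List.getElem_set, List.getElem_map, List.getElem_range]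
    by_cases hqc : c = q
    · subst hqc; simp
    · rw [if_neg hqc, if_neg (fun hh => hqc hh.2.symm)]
  · rw [if_neg hpr]
    refine List.map_congr_left (fun q hq => ?_)
    exact (if_neg (fun hh => hpr hh.1.symm)).symm

theorem pvTbl_congr (g g' : Nat → Nat → Int) (m n : Nat)
    (h : ∀ r ≤ m, ∀ c ≤ n, g r c = g' r c) : pvTbl g m n = pvTbl g' m n := by
  unfold pvTbl
  refine List.map_congr_left (fun r hr => ?_)
  exact List.map_congr_left (fun c hc =>
    h r (Nat.lt_succ_iff.mp (List.mem_range.mp hr)) c (Nat.lt_succ_iff.mp (List.mem_range.mp hc)))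

theorem pv_dp0_eq (m n : Nat) :
    List.replicate (m+1) (List.replicate (n+1) (0:Int)) = pvTbl (fun _ _ => 0) m n := by
  unfold pvTbl
  have h1 : ∀ r ∈ List.range (m+1),
      (List.range (n+1)).map ((fun (_ _ : Nat) => (0:Int)) r) = List.replicate (n+1) (0:Int) := by
    intro r _
    show (List.range (n+1)).map (fun _ => (0:Int)) = _
    rw [List.map_const', List.length_range]
  rw [List.map_congr_left h1, List.map_const', List.length_range]

-- one inner-loop step of A's fill preserves the closed form
theorem pv_fill_step (w1 w2 la lb : List String)
    (hla : la = w1.map PySem.Str.lower) (hlb : lb = w2.map PySem.Str.lower)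
    (i j : Nat) (hi : i < w1.length) (hj : j < w2.length) :
    pvFillEntry w1 w2 (pvTbl (pvGIn la lb i j) w1.length w2.length) i j
      = pvTbl (pvGIn la lb i (j+1)) w1.length w2.length := by
  unfold pvFillEntry
  rw [pvTbl_get _ _ _ i j (le_of_lt hi) (le_of_lt hj),
      pvTbl_get _ _ _ i (j+1) (le_of_lt hi) hj,
      pvTbl_get _ _ _ (i+1) j hi (le_of_lt hj)]
  have e1 : pvGIn la lb i j i j = pvF la lb i j := by simp [pvGIn]
  have e2 : pvGIn la lb i j i (j+1) = pvF la lb i (j+1) := by simp [pvGIn]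
  have e3 : pvGIn la lb i j (i+1) j = pvF la lb (i+1) j := by
    unfold pvGIn; rw [if_neg (by omega), if_pos ⟨rfl, le_refl j⟩]
  rw [e1, e2, e3]
  have hcond : (PySem.Str.lower (w1.getD i "") == PySem.Str.lower (w2.getD j ""))
      = (la.getD i "" == lb.getD j "") := by
    rw [hla, hlb, getD_lower, getD_lower]
  rw [hcond, show (if (la.getD i "" == lb.getD j "") then pvF la lb i j + 1
        else max (pvF la lb i (j+1)) (pvF la lb (i+1) j)) = pvF la lb (i+1) (j+1)
      from (pvF_succ la lb i j).symm]
  rw [pvTbl_set _ _ _ (i+1) (j+1) _ hi hj]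
  apply pvTbl_congr
  intro r hr c hc
  by_cases h1 : r = i+1 ∧ c = j+1
  · obtain ⟨rfl, rfl⟩ := h1
    rw [if_pos ⟨rfl, rfl⟩]
    unfold pvGIn
    rw [if_neg (by omega), if_pos ⟨rfl, le_refl _⟩]
  · rw [if_neg h1]
    unfold pvGIn
    by_cases h2 : r ≤ i
    · rw [if_pos h2, if_pos h2]
    · rw [if_neg h2, if_neg h2]
      by_cases h3 : r = i+1
      · subst h3
        have hc' : c ≠ j+1 := fun h => h1 ⟨rfl, h⟩
        split_ifs with h4 h5 <;> first | rfl | omega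
      · rw [if_neg (fun hh => h3 hh.1), if_neg (fun hh => h3 hh.1)]

theorem pv_inner_inv (w1 w2 la lb : List String)
    (hla : la = w1.map PySem.Str.lower) (hlb : lb = w2.map PySem.Str.lower)
    (i : Nat) (hi : i < w1.length) :
    ∀ j, j ≤ w2.length →
    (List.range j).foldl (fun dp j => pvFillEntry w1 w2 dp i j)
        (pvTbl (pvGIn la lb i 0) w1.length w2.length)
      = pvTbl (pvGIn la lb i j) w1.length w2.length := by
  intro j
  induction j with
  | zero => intro _; rfl
  | succ j ih =>
    intro hj
    rw [List.range_succ, List.foldl_append, ih (by omega)]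
    simp only [List.foldl_cons, List.foldl_nil]
    exact pv_fill_step w1 w2 la lb hla hlb i j hi (by omega)

theorem pv_outer_inv (w1 w2 la lb : List String)
    (hla : la = w1.map PySem.Str.lower) (hlb : lb = w2.map PySem.Str.lower) :
    ∀ i, i ≤ w1.length →
    (List.range i).foldl (fun dp i =>
        (List.range w2.length).foldl (fun dp j => pvFillEntry w1 w2 dp i j) dp)
        (pvTbl (fun _ _ => 0) w1.length w2.length)
      = pvTbl (pvGOut la lb i) w1.length w2.length := by
  intro i
  induction i with
  | zero =>
    intro _
    apply pvTbl_congr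
    intro r hr c hc
    unfold pvGOut
    split_ifs with h
    · have : r = 0 := by omega
      subst this
      simp [pvF, pvS_zero_l]
    · rfl
  | succ i ih =>
    intro hi
    rw [List.range_succ, List.foldl_append, ih (by omega)]
    simp only [List.foldl_cons, List.foldl_nil]
    rw [show pvTbl (pvGOut la lb i) w1.length w2.length
          = pvTbl (pvGIn la lb i 0) w1.length w2.length by
      apply pvTbl_congr
      intro r hr c hc
      unfold pvGOut pvGIn
      by_cases h2 : r ≤ i
      · rw [if_pos h2, if_pos h2]
      · rw [if_neg h2, if_neg h2]
        by_cases h3 : r = i+1 ∧ c ≤ 0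
        · obtain ⟨rfl, hc0⟩ := h3
          have : c = 0 := by omega
          subst this
          rw [if_pos ⟨rfl, le_refl _⟩]
          simp [pvF, pvS_zero_r]
        · rw [if_neg h3]]
    rw [pv_inner_inv w1 w2 la lb hla hlb i (by omega) w2.length le_rfl]
    apply pvTbl_congr
    intro r hr c hc
    unfold pvGIn pvGOut
    by_cases h2 : r ≤ i
    · rw [if_pos h2, if_pos (by omega)]
    · rw [if_neg h2]
      by_cases h3 : r = i+1
      · subst h3
        rw [if_pos ⟨rfl, hc⟩, if_pos (by omega)]
      · rw [if_neg (fun hh => h3 hh.1), if_neg (by omega)]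

-- A's backtrack over the filled table produces pvS (reversed)
theorem pv_bt_inv (w1 w2 la lb : List String)
    (hla : la = w1.map PySem.Str.lower) (hlb : lb = w2.map PySem.Str.lower) :
    ∀ k i j, i + j ≤ k → i ≤ w1.length → j ≤ w2.length → ∀ acc,
    btA w1 w2 (pvTbl (pvGOut la lb w1.length) w1.length w2.length) i j acc
      = acc ++ (pvS la lb i j).reverse := by
  intro k
  induction k with
  | zero =>
    intro i j hij hi hj acc
    have : i = 0 := by omega
    subst this
    have : j = 0 := by omega
    subst this
    simp [btA, pvS_zero_l]
  | succ k ih =>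
    intro i j hij hi hj acc
    match i, j with
    | 0, j => simp [btA, pvS_zero_l]
    | i+1, 0 => simp [btA, pvS_zero_r]
    | i+1, j+1 =>
      rw [btA]
      rw [pvTbl_get _ _ _ i (j+1) (by omega) hj,
          pvTbl_get _ _ _ (i+1) j hi (by omega)]
      have hcond : (PySem.Str.lower (w1.getD i "") == PySem.Str.lower (w2.getD j ""))
          = (la.getD i "" == lb.getD j "") := by
        rw [hla, hlb, getD_lower, getD_lower]
      have eo1 : pvGOut la lb w1.length i (j+1) = pvF la lb i (j+1) := by
        unfold pvGOut; rw [if_pos (by omega)]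
      have eo2 : pvGOut la lb w1.length (i+1) j = pvF la lb (i+1) j := by
        unfold pvGOut; rw [if_pos hi]
      rw [hcond, eo1, eo2, pvS_succ]
      by_cases hm : (la.getD i "" == lb.getD j "") = true
      · rw [if_pos hm, if_pos hm, ih i j (by omega) (by omega) (by omega)]
        simp
      · rw [if_neg hm, if_neg hm]
        have hiff : (pvF la lb i (j+1) > pvF la lb (i+1) j)
            ↔ ((pvS la lb i (j+1)).length > (pvS la lb (i+1) j).length) := by
          unfold pvF; exact_mod_cast Iff.rfl
        by_cases hgt : (pvS la lb i (j+1)).length > (pvS la lb (i+1) j).length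
        · rw [if_pos (hiff.mpr hgt), if_pos hgt]
          exact ih i (j+1) (by omega) (by omega) hj acc
        · rw [if_neg (fun h => hgt (hiff.mp h)), if_neg hgt]
          exact ih (i+1) j (by omega) hi (by omega) acc

-- B's inner loop builds row i+1 of the pair-list table
theorem pv_alt_inner_inv (la lb : List String) (i : Nat)
    (prev : List (List (Int × Int)))
    (hprev : prev = (List.range (lb.length+1)).map (pvS la lb i)) :
    ∀ j, j ≤ lb.length →
    (List.range j).foldl (fun cur j =>
        if la.getD i "" == lb.getD j "" then
          cur ++ [prev.getD j [] ++ [((i : Int), (j : Int))]]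
        else cur ++ [if (prev.getD (j+1) []).length > (cur.getD j []).length
                     then prev.getD (j+1) [] else cur.getD j []]) [[]]
      = (List.range (j+1)).map (pvS la lb (i+1)) := by
  intro j
  induction j with
  | zero =>
    intro _
    simp [pvS_zero_r]
  | succ j ih =>
    intro hj
    rw [List.range_succ, List.foldl_append, ih (by omega)]
    simp only [List.foldl_cons, List.foldl_nil]
    rw [hprev]
    rw [PySem.List.getD_map_range _ _ _ _ (by omega : j < lb.length+1),
        PySem.List.getD_map_range _ _ _ _ (by omega : j+1 < lb.length+1),
        PySem.List.getD_map_range _ _ _ _ (by omega : j < j+1)]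
    rw [show (List.range (j+1+1)).map (pvS la lb (i+1))
          = (List.range (j+1)).map (pvS la lb (i+1)) ++ [pvS la lb (i+1) (j+1)] by
      rw [List.range_succ, List.map_append]; rfl]
    rw [pvS_succ]
    split_ifs with h1 h2 <;> rfl

theorem pv_alt_outer_inv (la lb : List String) :
    ∀ i, i ≤ la.length →
    (List.range i).foldl (fun prev i =>
        (List.range lb.length).foldl (fun cur j =>
          if la.getD i "" == lb.getD j "" then
            cur ++ [prev.getD j [] ++ [((i : Int), (j : Int))]]
          else cur ++ [if (prev.getD (j+1) []).length > (cur.getD j []).length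
                       then prev.getD (j+1) [] else cur.getD j []]) [[]])
        (List.replicate (lb.length+1) [])
      = (List.range (lb.length+1)).map (pvS la lb i) := by
  intro i
  induction i with
  | zero =>
    intro _
    rw [List.range_zero]
    simp only [List.foldl_nil]
    rw [show (List.range (lb.length+1)).map (pvS la lb 0)
          = (List.range (lb.length+1)).map (fun _ => ([] : List (Int × Int))) from
        List.map_congr_left (fun c _ => pvS_zero_l la lb c)]
    rw [List.map_const', List.length_range]
  | succ i ih =>
    intro hi
    rw [List.range_succ, List.foldl_append, ih (by omega)]
    simp only [List.foldl_cons, List.foldl_nil]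
    exact pv_alt_inner_inv la lb i _ rfl lb.length le_rfl

theorem pv_ports_eq (text1 text2 : String) :
    word_based_lcs_alignment_with_pairs text1 text2
      = word_based_lcs_alignment_with_pairs_alt text1 text2 := by
  unfold word_based_lcs_alignment_with_pairs word_based_lcs_alignment_with_pairs_alt
  simp only [pv_dp0_eq]
  rw [pv_outer_inv (PySem.Str.split₀ text1) (PySem.Str.split₀ text2) _ _ rfl rfl _ le_rfl]
  rw [pv_bt_inv (PySem.Str.split₀ text1) (PySem.Str.split₀ text2) _ _ rfl rfl
        ((PySem.Str.split₀ text1).length + (PySem.Str.split₀ text2).length)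
        (PySem.Str.split₀ text1).length (PySem.Str.split₀ text2).length le_rfl le_rfl le_rfl []]
  rw [List.nil_append, List.reverse_reverse]
  rw [pv_alt_outer_inv ((PySem.Str.split₀ text1).map PySem.Str.lower)
        ((PySem.Str.split₀ text2).map PySem.Str.lower) _ le_rfl]
  simp [List.length_map, List.length_range]

-- ===== VERDICT (by name: the statement is the Claim_ definition above) =====
theorem word_based_lcs_alignment_with_pairs_spec : Claim_equal_word_based_lcs_alignment_with_pairs := by
  intro text1 text2 _
  unfold Spec_word_based_lcs_alignment_with_pairs
  exact pv_ports_eq text1 text2
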